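-- pv_equiv track=rewrite | github.com/ImZackAdams/baltimore_law_bot | app/utils/pdf_processing.py | extract_sections_titles_subtitles
-- ===== SOURCE A (Python) =====
-- def extract_sections_titles_subtitles(text):
--     sections = []
--     current_title = ""
--     current_subtitle = ""
--     current_content = ""
--
--     # You would need to adapt these to the actual markers or formatting used in your document
--     title_marker = "TITLE:"
--     subtitle_marker = "SUBTITLE:"
--
--     for line in text.split('\n'):
--         if title_marker in line:
--             # Save the current section before starting a new one
--             if current_content:
--                 sections.append({
--                     'title': current_title,
--                     'subtitle': current_subtitle,
--                     'content': current_content.strip(),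
--                 })
--
--             # Start a new section
--             current_title = line.replace(title_marker, '').strip()
--             current_subtitle = ""
--             current_content = ""
--         elif subtitle_marker in line:
--             current_subtitle = line.replace(subtitle_marker, '').strip()
--         else:
--             current_content += line + '\n'
--
--     # Don't forget to save the last section
--     if current_content:
--         sections.append({
--             'title': current_title,
--             'subtitle': current_subtitle,
--             'content': current_content.strip(),
--         })
--
--     return sections
-- ===== SOURCE B (Python) =====
-- def extract_sections_titles_subtitles(text):
--     title_marker = "TITLE:"
--     subtitle_marker = "SUBTITLE:"
--
--     def emit(title, seg_lines):
--         # one section from a segment: last subtitle line wins, rest is content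
--         subtitle = ""
--         content_lines = []
--         for line in seg_lines:
--             if subtitle_marker in line:
--                 subtitle = line.replace(subtitle_marker, '').strip()
--             else:
--                 content_lines.append(line)
--         if not content_lines:
--             return []
--         return [{'title': title, 'subtitle': subtitle,
--                  'content': '\n'.join(content_lines).strip()}]
--
--     sections = []
--     lines = text.split('\n')
--     title = ""
--     while True:
--         # segment = lines up to the next title line
--         i = 0
--         while i < len(lines) and title_marker not in lines[i]:
--             i += 1
--         sections += emit(title, lines[:i])
--         if i == len(lines):
--             return sections
--         title = lines[i].replace(title_marker, '').strip()
--         lines = lines[i + 1:]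
-- ===== Notes on version B (the rewrite author's own statement) =====
-- stated objective: alternative
-- what changed: Replaces A's incremental flush-on-title state machine (one fold carrying sections/title/subtitle and a growing content string) by a segment decomposition: scan to each title line, slice the segment off, and build that segment's section in its own pass, joining content lines at the end.
import Mathlib
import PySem

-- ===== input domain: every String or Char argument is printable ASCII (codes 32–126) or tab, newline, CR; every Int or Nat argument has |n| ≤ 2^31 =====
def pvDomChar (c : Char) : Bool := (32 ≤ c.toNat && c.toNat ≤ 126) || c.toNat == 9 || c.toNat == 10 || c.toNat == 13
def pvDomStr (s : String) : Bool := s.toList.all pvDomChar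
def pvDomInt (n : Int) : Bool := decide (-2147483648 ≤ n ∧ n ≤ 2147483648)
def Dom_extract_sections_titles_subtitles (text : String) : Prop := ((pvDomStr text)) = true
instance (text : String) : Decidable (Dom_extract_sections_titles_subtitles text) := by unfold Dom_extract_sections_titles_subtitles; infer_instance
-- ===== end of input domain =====

-- B replaces A's flush-on-title state machine by a segment decomposition (split at title
-- lines, then build each section from its segment); same results, objective: alternative.

-- ===== PORT A =====
-- the two markers (string work is done on List Char, as PySem defines its string primitives)
def pvTM : List Char := "TITLE:".toList
def pvSM : List Char := "SUBTITLE:".toList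

-- the section dict A appends (both at a title line and after the loop)
def pvFlushA (secs : List (List (String × String))) (t s c : List Char) :
    List (List (String × String)) :=
  if c ≠ [] then
    secs ++ [[("title", String.ofList t), ("subtitle", String.ofList s),
              ("content", String.ofList (PySem.Chars.strip c))]]
  else secs

-- one iteration of A's for-loop over (sections, current_title, current_subtitle, current_content)
def pvStepA (st : List (List (String × String)) × List Char × List Char × List Char)
    (line : List Char) :
    List (List (String × String)) × List Char × List Char × List Char :=
  match st with
  | (secs, t, s, c) =>
    if PySem.Chars.isIn pvTM line then
      (pvFlushA secs t s c, PySem.Chars.strip (PySem.Chars.replace line pvTM []), [], [])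
    else if PySem.Chars.isIn pvSM line then
      (secs, t, PySem.Chars.strip (PySem.Chars.replace line pvSM []), c)
    else (secs, t, s, c ++ line ++ ['\n'])

def extract_sections_titles_subtitles (text : String) : List (List (String × String)) :=
  match (PySem.Chars.splitOn text.toList ['\n']).foldl pvStepA ([], [], [], []) with
  | (secs, t, s, c) => pvFlushA secs t s c

-- ===== PORT B =====
-- B's inner loop over a segment's lines: (subtitle, content_lines)
def pvStepB (p : List Char × List (List Char)) (line : List Char) :
    List Char × List (List Char) :=
  if PySem.Chars.isIn pvSM line then
    (PySem.Chars.strip (PySem.Chars.replace line pvSM []), p.2)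
  else (p.1, p.2 ++ [line])

-- B's emit(title, seg_lines)
def pvEmitSeg (title : List Char) (seg : List (List Char)) : List (List (String × String)) :=
  match seg.foldl pvStepB ([], []) with
  | (subtitle, cls) =>
    if cls = [] then []
    else [[("title", String.ofList title), ("subtitle", String.ofList subtitle),
           ("content", String.ofList (PySem.Chars.strip (PySem.Chars.join ['\n'] cls)))]]

def pvNoTitle (line : List Char) : Bool := ! PySem.Chars.isIn pvTM line

-- B's outer while-loop: scan to the next title line (takeWhile/dropWhile), emit, continue
def pvGoB (title : List Char) (lines : List (List Char)) : List (List (String × String)) :=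
  pvEmitSeg title (lines.takeWhile pvNoTitle) ++
    (match hdw : lines.dropWhile pvNoTitle with
     | [] => []
     | l :: ls => pvGoB (PySem.Chars.strip (PySem.Chars.replace l pvTM [])) ls)
termination_by lines.length
decreasing_by
  have h1 : (lines.dropWhile pvNoTitle).length ≤ lines.length := by
    simpa using List.length_dropWhile_le pvNoTitle lines
  rw [hdw] at h1; simp at h1; omega

def extract_sections_titles_subtitles_alt (text : String) : List (List (String × String)) :=
  pvGoB [] (PySem.Chars.splitOn text.toList ['\n'])

-- ===== PRECONDITION & SPEC =====
def Spec_extract_sections_titles_subtitles (text : String) (out : List (List (String × String))) : Prop := out = extract_sections_titles_subtitles_alt text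
instance (text : String) (out : List (List (String × String))) : Decidable (Spec_extract_sections_titles_subtitles text out) := by unfold Spec_extract_sections_titles_subtitles; infer_instance

-- ===== CLAIM (what is proved, stated in full; the proofs are below) =====
def Claim_equal_extract_sections_titles_subtitles : Prop := ∀ (text : String), Dom_extract_sections_titles_subtitles text → Spec_extract_sections_titles_subtitles text (extract_sections_titles_subtitles text)

-- ===== LEMMAS AND PROOFS =====

-- A's loop, written as a recursion over the remaining lines (proof-side restatement of pvStepA)
def pvProcA (t s c : List Char) : List (List Char) → List (List (String × String))
  | [] => pvFlushA [] t s c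
  | l :: ls =>
    if PySem.Chars.isIn pvTM l then
      pvFlushA [] t s c ++ pvProcA (PySem.Chars.strip (PySem.Chars.replace l pvTM [])) [] [] ls
    else if PySem.Chars.isIn pvSM l then
      pvProcA t (PySem.Chars.strip (PySem.Chars.replace l pvSM [])) c ls
    else pvProcA t s (c ++ l ++ ['\n']) ls

-- the content string A accumulates from a list of content lines
def pvConcatNl (cls : List (List Char)) : List Char := (cls.map (· ++ ['\n'])).flatten

theorem pvConcatNl_nil : pvConcatNl [] = [] := rfl

theorem pvConcatNl_append_one (cls : List (List Char)) (l : List Char) :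
    pvConcatNl cls ++ l ++ ['\n'] = pvConcatNl (cls ++ [l]) := by
  simp [pvConcatNl]

theorem pvConcatNl_eq_nil_iff (cls : List (List Char)) : pvConcatNl cls = [] ↔ cls = [] := by
  constructor
  · intro h
    cases cls with
    | nil => rfl
    | cons x xs => simp [pvConcatNl] at h
  · intro h; simp [h, pvConcatNl]

theorem pvRstrip_newline (x : List Char) :
    PySem.Chars.rstrip (x ++ ['\n']) = PySem.Chars.rstrip x := by
  simp only [PySem.Chars.rstrip, List.reverse_append, List.reverse_cons, List.reverse_nil,
    List.nil_append, List.singleton_append, List.dropWhile,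
    show PySem.Chars.isspace '\n' = true from by decide]

theorem pvStrip_newline (x : List Char) :
    PySem.Chars.strip (x ++ ['\n']) = PySem.Chars.strip x := by
  simp only [PySem.Chars.strip, PySem.Chars.lstrip, List.dropWhile_append]
  by_cases h : (x.dropWhile PySem.Chars.isspace).isEmpty
  · have hx : x.dropWhile PySem.Chars.isspace = [] := by simpa [List.isEmpty_iff] using h
    simp [hx, List.dropWhile, show PySem.Chars.isspace '\n' = true from by decide,
      PySem.Chars.rstrip]
  · simp [h, pvRstrip_newline]

theorem pvConcatNl_eq_join (cls : List (List Char)) (h : cls ≠ []) :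
    pvConcatNl cls = PySem.Chars.join ['\n'] cls ++ ['\n'] := by
  induction cls with
  | nil => exact absurd rfl h
  | cons x xs ih =>
    cases xs with
    | nil => simp [pvConcatNl, PySem.Chars.join, List.intercalate]
    | cons y ys =>
      have := ih (by simp)
      simp only [pvConcatNl, List.map_cons, List.flatten_cons] at this ⊢
      rw [this]
      simp [PySem.Chars.join, List.intercalate, List.intersperse_cons₂]

theorem pvStrip_concatNl (cls : List (List Char)) (h : cls ≠ []) :
    PySem.Chars.strip (pvConcatNl cls) = PySem.Chars.strip (PySem.Chars.join ['\n'] cls) := by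
  rw [pvConcatNl_eq_join cls h, pvStrip_newline]

theorem pvFlushA_split (secs : List (List (String × String))) (t s c : List Char) :
    pvFlushA secs t s c = secs ++ pvFlushA [] t s c := by
  unfold pvFlushA; split <;> simp

-- pvGoB with its dependent match replaced by a plain one (its defining equation)
theorem pvGoB_eq (t : List Char) (ls : List (List Char)) :
    pvGoB t ls = pvEmitSeg t (ls.takeWhile pvNoTitle) ++
      (match ls.dropWhile pvNoTitle with
       | [] => []
       | l :: ls' => pvGoB (PySem.Chars.strip (PySem.Chars.replace l pvTM [])) ls') := by
  rw [pvGoB]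
  congr 1
  split <;> rename_i heq <;> simp [heq]

-- A's foldl, with the final flush, equals the recursion pvProcA
theorem pvFoldA_eq_procA (ls : List (List Char)) :
    ∀ (secs : List (List (String × String))) (t s c : List Char),
    (match ls.foldl pvStepA (secs, t, s, c) with
     | (a, b, d, e) => pvFlushA a b d e) = secs ++ pvProcA t s c ls := by
  induction ls with
  | nil => intro secs t s c; simpa [pvProcA] using pvFlushA_split secs t s c
  | cons l ls ih =>
    intro secs t s c
    simp only [List.foldl_cons, pvStepA, pvProcA]
    split_ifs with h1 h2
    · simp only [ih]
      rw [pvFlushA_split secs t s c, List.append_assoc]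
    · simp [ih]
    · simp [ih]

-- pvEmitSeg, generalized to a running subtitle s and pending content lines pcs
def pvEmit2 (t s : List Char) (pcs : List (List Char)) (seg : List (List Char)) :
    List (List (String × String)) :=
  match seg.foldl pvStepB (s, pcs) with
  | (subtitle, cls) =>
    if cls = [] then []
    else [[("title", String.ofList t), ("subtitle", String.ofList subtitle),
           ("content", String.ofList (PySem.Chars.strip (pvConcatNl cls)))]]

theorem pvEmit2_eq_emitSeg (t : List Char) (seg : List (List Char)) :
    pvEmit2 t [] [] seg = pvEmitSeg t seg := by
  unfold pvEmit2 pvEmitSeg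
  rcases hf : seg.foldl pvStepB ([], []) with ⟨s', cls⟩
  by_cases h : cls = []
  · simp [h]
  · simp [h, pvStrip_concatNl cls h]

-- main invariant: A's recursion with pending state (s, pcs) is B's segment processing
theorem pvProcA_eq_goB_gen (ls : List (List Char)) :
    ∀ (t s : List Char) (pcs : List (List Char)),
    pvProcA t s (pvConcatNl pcs) ls =
      pvEmit2 t s pcs (ls.takeWhile pvNoTitle) ++
        (match ls.dropWhile pvNoTitle with
         | [] => []
         | l :: ls' => pvGoB (PySem.Chars.strip (PySem.Chars.replace l pvTM [])) ls') := by
  induction ls with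
  | nil =>
    intro t s pcs
    simp only [List.takeWhile_nil, List.dropWhile_nil, pvProcA, pvEmit2, List.foldl_nil,
      pvFlushA]
    by_cases h : pcs = []
    · simp [h, pvConcatNl_nil]
    · simp [h, (pvConcatNl_eq_nil_iff pcs).not.mpr h]
  | cons l ls ih =>
    intro t s pcs
    by_cases h1 : PySem.Chars.isIn pvTM l
    · have hn : pvNoTitle l = false := by simp [pvNoTitle, h1]
      simp only [pvProcA, if_pos h1, List.takeWhile_cons, hn, List.dropWhile_cons, Bool.false_eq_true,
        if_false]
      rw [show pvProcA (PySem.Chars.strip (PySem.Chars.replace l pvTM [])) [] [] ls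
            = pvProcA (PySem.Chars.strip (PySem.Chars.replace l pvTM [])) [] (pvConcatNl []) ls
          from rfl, ih]
      rw [pvEmit2_eq_emitSeg]
      rw [← pvGoB_eq]
      unfold pvEmit2 pvFlushA
      simp only [List.foldl_nil]
      by_cases h : pcs = []
      · simp [h, pvConcatNl_nil]
      · simp [h, (pvConcatNl_eq_nil_iff pcs).not.mpr h]
    · have hn : pvNoTitle l = true := by simp [pvNoTitle, h1]
      by_cases h2 : PySem.Chars.isIn pvSM l
      · simp only [pvProcA, h1, if_false, h2, if_pos, Bool.false_eq_true]
        rw [ih]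
        simp only [List.takeWhile_cons, hn, List.dropWhile_cons, if_pos, pvEmit2,
          List.foldl_cons, pvStepB, h2, if_pos]
      · simp only [pvProcA, h1, h2, if_false, Bool.false_eq_true]
        rw [pvConcatNl_append_one, ih]
        simp only [List.takeWhile_cons, hn, List.dropWhile_cons, if_pos, pvEmit2,
          List.foldl_cons, pvStepB, h2, if_false, Bool.false_eq_true]

theorem pvProcA_eq_goB (ls : List (List Char)) (t : List Char) :
    pvProcA t [] [] ls = pvGoB t ls := by
  rw [show pvProcA t [] [] ls = pvProcA t [] (pvConcatNl []) ls from rfl,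
    pvProcA_eq_goB_gen, pvEmit2_eq_emitSeg, ← pvGoB_eq]

-- ===== VERDICT (by name: the statement is the Claim_ definition above) =====
theorem extract_sections_titles_subtitles_spec : Claim_equal_extract_sections_titles_subtitles := by
  intro text _
  show _ = _
  unfold extract_sections_titles_subtitles extract_sections_titles_subtitles_alt
  rw [pvFoldA_eq_procA, pvProcA_eq_goB]
  simp
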